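-- pv_equiv track=rewrite | github.com/arkalia-luna-system/ia-pipeline | athalia_core/distillation/response_distiller.py | stacking
-- ===== SOURCE A (Python) =====
-- from typing import Any, Dict, List, Optional
--
-- def stacking(
--     responses: List[str], context: Optional[Dict[str, Any]] = None
-- ) -> str:
--     """Concatène les parties communes, puis les parties uniques."""
--     if not responses:
--         return ""
--     words = [set(r.split()) for r in responses]
--     common = set.intersection(*words) if words else set()
--     unique = set.union(*words) - common
--     return " ".join(sorted(common)) + " | " + " ".join(sorted(unique))
-- ===== SOURCE B (Python) =====
-- from typing import Any, Dict, List, Optional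
--
-- def stacking(
--     responses: List[str], context: Optional[Dict[str, Any]] = None
-- ) -> str:
--     """Tally, per word, in how many responses it occurs; words hitting the
--     total count are common, the rest unique."""
--     if not responses:
--         return ""
--     n = len(responses)
--     counts = {}
--     for r in responses:
--         for w in dict.fromkeys(r.split()):
--             counts[w] = counts.get(w, 0) + 1
--     common = sorted(w for w, c in counts.items() if c == n)
--     unique = sorted(w for w, c in counts.items() if c < n)
--     return " ".join(common) + " | " + " ".join(unique)
-- ===== Notes on version B (the rewrite author's own statement) =====
-- stated objective: alternative
-- what changed: Replaces the set.intersection/set.union/difference pipeline with a single occurrence-count table (one dict of word -> number of responses containing it), partitioning words by count == n vs count < n.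
import Mathlib
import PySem

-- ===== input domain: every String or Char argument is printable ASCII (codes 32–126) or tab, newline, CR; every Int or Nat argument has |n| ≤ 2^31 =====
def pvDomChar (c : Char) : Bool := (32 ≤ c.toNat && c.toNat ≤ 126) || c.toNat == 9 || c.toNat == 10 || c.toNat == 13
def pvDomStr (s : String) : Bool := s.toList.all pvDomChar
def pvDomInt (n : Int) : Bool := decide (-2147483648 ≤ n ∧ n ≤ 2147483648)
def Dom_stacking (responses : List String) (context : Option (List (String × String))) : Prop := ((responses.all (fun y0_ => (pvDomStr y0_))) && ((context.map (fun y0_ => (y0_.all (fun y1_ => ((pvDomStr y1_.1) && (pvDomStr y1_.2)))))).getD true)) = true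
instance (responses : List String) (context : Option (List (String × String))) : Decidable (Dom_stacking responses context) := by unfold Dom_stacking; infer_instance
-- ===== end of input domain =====

-- B replaces A's set.intersection/union/difference pipeline by one occurrence-count
-- table (word -> number of responses containing it) partitioned by count == n vs count < n;
-- objective: an alternative single-pass counting decomposition, same asymptotic cost.

-- ===== PORT A =====
def stacking (responses : List String) (context : Option (List (String × String))) : String :=
  if responses = [] then "" else
  let words := responses.map (fun r => PySem.Set.ofList (PySem.Str.split₀ r))
  let common : PySem.Set String :=
    match words with
    | [] => PySem.Set.empty
    | w :: ws => ws.foldl PySem.Set.inter w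
  let union : PySem.Set String :=
    match words with
    | [] => PySem.Set.empty
    | w :: ws => ws.foldl PySem.Set.union w
  let unique := PySem.Set.diff union common
  PySem.Str.join " " (PySem.List.sorted common (fun x => x) false) ++ " | " ++
    PySem.Str.join " " (PySem.List.sorted unique (fun x => x) false)

-- ===== PORT B =====
def stacking_alt (responses : List String) (context : Option (List (String × String))) : String :=
  if responses = [] then "" else
  let n : Int := responses.length
  let counts : PySem.Dict String Int :=
    responses.foldl
      (fun d r => (PySem.List.dedup (PySem.Str.split₀ r)).foldl
        (fun d w => d.modify w 0 (· + 1)) d)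
      PySem.Dict.empty
  let common := PySem.List.sorted ((counts.items.filter (fun p => p.2 == n)).map (·.1)) (fun x => x) false
  let unique := PySem.List.sorted ((counts.items.filter (fun p => decide (p.2 < n))).map (·.1)) (fun x => x) false
  PySem.Str.join " " common ++ " | " ++ PySem.Str.join " " unique

-- ===== PRECONDITION & SPEC =====
def Spec_stacking (responses : List String) (context : Option (List (String × String))) (out : String) : Prop := out = stacking_alt responses context
instance (responses : List String) (context : Option (List (String × String))) (out : String) : Decidable (Spec_stacking responses context out) := by unfold Spec_stacking; infer_instance

-- ===== CLAIM (what is proved, stated in full; the proofs are below) =====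
def Claim_equal_stacking : Prop := ∀ (responses : List String) (context : Option (List (String × String))), Dom_stacking responses context → Spec_stacking responses context (stacking responses context)

-- ===== LEMMAS AND PROOFS =====

theorem mem_foldl_inter {x : String} (ws : List (PySem.Set String)) (w : PySem.Set String) :
    x ∈ ws.foldl PySem.Set.inter w ↔ x ∈ w ∧ ∀ s ∈ ws, x ∈ s := by
  induction ws generalizing w with
  | nil => simp
  | cons a t ih => simp [List.foldl_cons, ih, PySem.Set.mem_inter]; tauto

theorem mem_foldl_union {x : String} (ws : List (PySem.Set String)) (w : PySem.Set String) :
    x ∈ ws.foldl PySem.Set.union w ↔ x ∈ w ∨ ∃ s ∈ ws, x ∈ s := by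
  induction ws generalizing w with
  | nil => simp
  | cons a t ih => simp [List.foldl_cons, ih, PySem.Set.mem_union]; tauto

theorem nodup_foldl_inter (ws : List (PySem.Set String)) (w : PySem.Set String) (h : w.Nodup) :
    (ws.foldl PySem.Set.inter w).Nodup := by
  induction ws generalizing w with
  | nil => exact h
  | cons a t ih => exact ih _ (PySem.Set.nodup_inter w a h)

theorem nodup_foldl_union (ws : List (PySem.Set String)) (w : PySem.Set String) (h : w.Nodup) :
    (ws.foldl PySem.Set.union w).Nodup := by
  induction ws generalizing w with
  | nil => exact h
  | cons a t ih => exact ih _ (PySem.Set.nodup_union w a h)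

theorem foldl_flatMap_counts (responses : List String) :
    responses.foldl
      (fun d r => (PySem.List.dedup (PySem.Str.split₀ r)).foldl
        (fun d w => d.modify w 0 (· + 1)) d)
      PySem.Dict.empty
    = PySem.Dict.counter (responses.flatMap (fun r => PySem.List.dedup (PySem.Str.split₀ r))) := by
  rw [PySem.Dict.counter_eq_foldl]
  generalize (PySem.Dict.empty : PySem.Dict String Int) = d
  induction responses generalizing d with
  | nil => rfl
  | cons a t ih =>
    rw [List.flatMap_cons, List.foldl_cons, List.foldl_append]
    exact ih _

theorem count_flatMap_dedup (x : String) (responses : List String) :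
    (responses.flatMap (fun r => PySem.List.dedup (PySem.Str.split₀ r))).count x
    = responses.countP (fun r => decide (x ∈ PySem.List.dedup (PySem.Str.split₀ r))) := by
  induction responses with
  | nil => rfl
  | cons a t ih =>
    rw [List.flatMap_cons, List.count_append, ih, List.countP_cons]
    by_cases hx : x ∈ PySem.List.dedup (PySem.Str.split₀ a)
    · have h1 : (PySem.List.dedup (PySem.Str.split₀ a)).count x = 1 :=
        List.count_eq_one_of_mem (by rw [PySem.List.dedup_eq_ofList]; exact PySem.Set.nodup_ofList _) hx
      rw [h1]
      simp only [hx, decide_true, if_true]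
      omega
    · rw [List.count_eq_zero_of_not_mem hx]
      have hx' : x ∉ PySem.Str.split₀ a := by
        simpa [PySem.List.dedup_eq_ofList, PySem.Set.mem_ofList] using hx
      simp [hx']

-- sorting a list and sorting a nodup rearrangement of it give the same list
theorem sorted_eq_of_members {xs ys : List String} (hx : xs.Nodup) (hy : ys.Nodup)
    (hmem : ∀ a, a ∈ xs ↔ a ∈ ys) :
    PySem.List.sorted xs (fun x => x) false = PySem.List.sorted ys (fun x => x) false := by
  exact PySem.List.sorted_eq_sorted_of_perm xs ys _ (fun a b h => h)
    ((List.perm_ext_iff_of_nodup hx hy).2 hmem)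

-- the two unsorted word lists of B, after rewriting the counter's items
theorem bside_filter (l : List String) (p : Int → Bool) :
    (((PySem.Dict.counter (l.flatMap (fun r => PySem.List.dedup (PySem.Str.split₀ r)))).items.filter
        (fun q => p q.2)).map (·.1))
    = (PySem.Set.ofList (l.flatMap (fun r => PySem.List.dedup (PySem.Str.split₀ r)))).filter
        (fun k => p ((l.flatMap (fun r => PySem.List.dedup (PySem.Str.split₀ r))).count k : Int)) := by
  rw [PySem.Dict.items_counter]
  rw [List.filter_map, List.map_map]
  simp [Function.comp_def]

theorem mem_wflat (l : List String) (x : String) :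
    x ∈ l.flatMap (fun r => PySem.List.dedup (PySem.Str.split₀ r)) ↔
      ∃ r ∈ l, x ∈ PySem.Str.split₀ r := by
  simp [List.mem_flatMap, PySem.List.dedup_eq_ofList, PySem.Set.mem_ofList]

-- ===== VERDICT (by name: the statement is the Claim_ definition above) =====
theorem stacking_spec : Claim_equal_stacking := by
  intro responses context _
  unfold Spec_stacking stacking stacking_alt
  by_cases hresp : responses = []
  · simp [hresp]
  · obtain ⟨r0, rs, rfl⟩ := List.exists_cons_of_ne_nil hresp
    rw [if_neg hresp, if_neg hresp]
    simp only [List.map_cons, foldl_flatMap_counts]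
    -- abbreviations
    set ws := (r0 :: rs).flatMap (fun r => PySem.List.dedup (PySem.Str.split₀ r)) with hws
    set w0 := PySem.Set.ofList (PySem.Str.split₀ r0) with hw0
    set sets := rs.map (fun r => PySem.Set.ofList (PySem.Str.split₀ r)) with hsets
    have hcount : ∀ x : String, ws.count x =
        (r0 :: rs).countP (fun r => decide (x ∈ PySem.List.dedup (PySem.Str.split₀ r))) :=
      fun x => count_flatMap_dedup x (r0 :: rs)
    have hle : ∀ x : String, ws.count x ≤ (r0 :: rs).length := by
      intro x; rw [hcount]; exact List.countP_le_length
    have hfull : ∀ x : String, (ws.count x = (r0 :: rs).length ↔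
        ∀ r ∈ r0 :: rs, x ∈ PySem.Str.split₀ r) := by
      intro x
      rw [hcount, List.countP_eq_length]
      simp [PySem.List.dedup_eq_ofList, PySem.Set.mem_ofList]
    -- common part
    have hcom : PySem.List.sorted (sets.foldl PySem.Set.inter w0) (fun x => x) false
        = PySem.List.sorted (PySem.Set.ofList ws |>.filter
            (fun k => ((ws.count k : Int) == ((r0 :: rs).length : Int)))) (fun x => x) false := by
      apply sorted_eq_of_members
      · exact nodup_foldl_inter _ _ (PySem.Set.nodup_ofList _)
      · exact (PySem.Set.nodup_ofList _).filter _
      · intro x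
        rw [mem_foldl_inter, List.mem_filter]
        simp only [PySem.Set.mem_ofList, hsets, List.mem_map, hw0]
        constructor
        · rintro ⟨h0, hall⟩
          have hmem : ∀ r ∈ r0 :: rs, x ∈ PySem.Str.split₀ r := by
            intro r hr
            rcases List.mem_cons.1 hr with rfl | hr
            · exact h0
            · exact (PySem.Set.mem_ofList _ _).1 (hall _ ⟨r, hr, rfl⟩)
          refine ⟨(mem_wflat _ _).2 ⟨r0, List.mem_cons_self, hmem r0 List.mem_cons_self⟩, ?_⟩
          have := (hfull x).2 hmem
          simp [this]
        · rintro ⟨hin, hc⟩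
          have hc' : ws.count x = (r0 :: rs).length := by
            have := of_decide_eq_true hc
            exact_mod_cast this
          have hmem := (hfull x).1 hc'
          refine ⟨hmem r0 List.mem_cons_self, ?_⟩
          rintro s ⟨r, hr, rfl⟩
          exact (PySem.Set.mem_ofList _ _).2 (hmem r (List.mem_cons_of_mem _ hr))
    -- unique part
    have huniq : PySem.List.sorted (PySem.Set.diff (sets.foldl PySem.Set.union w0)
            (sets.foldl PySem.Set.inter w0)) (fun x => x) false
        = PySem.List.sorted (PySem.Set.ofList ws |>.filter
            (fun k => decide ((ws.count k : Int) < ((r0 :: rs).length : Int)))) (fun x => x) false := by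
      apply sorted_eq_of_members
      · exact PySem.Set.nodup_diff _ _ (nodup_foldl_union _ _ (PySem.Set.nodup_ofList _))
      · exact (PySem.Set.nodup_ofList _).filter _
      · intro x
        rw [PySem.Set.mem_diff, mem_foldl_union, mem_foldl_inter, List.mem_filter]
        simp only [PySem.Set.mem_ofList, hsets, List.mem_map, hw0]
        have hex : (x ∈ PySem.Str.split₀ r0 ∨
            ∃ s, (∃ r ∈ rs, PySem.Set.ofList (PySem.Str.split₀ r) = s) ∧ x ∈ s) ↔ x ∈ ws := by
          rw [mem_wflat]
          constructor
          · rintro (h0 | ⟨s, ⟨r, hr, rfl⟩, hx⟩)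
            · exact ⟨r0, List.mem_cons_self, h0⟩
            · exact ⟨r, List.mem_cons_of_mem _ hr, (PySem.Set.mem_ofList _ _).1 hx⟩
          · rintro ⟨r, hr, hx⟩
            rcases List.mem_cons.1 hr with rfl | hr
            · exact Or.inl hx
            · exact Or.inr ⟨_, ⟨r, hr, rfl⟩, (PySem.Set.mem_ofList _ _).2 hx⟩
        have hnall : (¬ (x ∈ PySem.Str.split₀ r0 ∧
            ∀ s, (∃ r ∈ rs, PySem.Set.ofList (PySem.Str.split₀ r) = s) → x ∈ s)) ↔
            ¬ ∀ r ∈ r0 :: rs, x ∈ PySem.Str.split₀ r := by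
          apply not_congr
          constructor
          · rintro ⟨h0, hall⟩ r hr
            rcases List.mem_cons.1 hr with rfl | hr
            · exact h0
            · exact (PySem.Set.mem_ofList _ _).1 (hall _ ⟨r, hr, rfl⟩)
          · intro hmem
            refine ⟨hmem r0 List.mem_cons_self, ?_⟩
            rintro s ⟨r, hr, rfl⟩
            exact (PySem.Set.mem_ofList _ _).2 (hmem r (List.mem_cons_of_mem _ hr))
        constructor
        · rintro ⟨hu, hnc⟩
          have hin : x ∈ ws := hex.1 (by tauto)
          refine ⟨hin, ?_⟩
          have : ws.count x ≠ (r0 :: rs).length := fun h => (hnall.1 (by tauto)) ((hfull x).1 h)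
          have hlt : ws.count x < (r0 :: rs).length := lt_of_le_of_ne (hle x) this
          simpa using (by exact_mod_cast hlt : (ws.count x : Int) < ((r0 :: rs).length : Int))
        · rintro ⟨hin, hlt⟩
          have hlt' : ws.count x < (r0 :: rs).length := by
            have := of_decide_eq_true hlt
            exact_mod_cast this
          have hnc : ¬ ∀ r ∈ r0 :: rs, x ∈ PySem.Str.split₀ r :=
            fun h => absurd ((hfull x).2 h) (Nat.ne_of_lt hlt')
          exact ⟨hex.2 hin, fun hc => hnall.2 hnc ⟨hc.1, hc.2⟩⟩
    rw [hcom, huniq,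
      bside_filter (r0 :: rs) (fun c => c == (((r0 :: rs).length : Nat) : Int)),
      bside_filter (r0 :: rs) (fun c => decide (c < (((r0 :: rs).length : Nat) : Int)))]
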